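-- pv_equiv track=rewrite | github.com/lordmacu/finearom_back | scripts/generate_forecasts.py | find_active_start
-- ===== SOURCE A (Python) =====
-- def find_active_start(series, min_gap=12):
--     """Detecta el inicio del último período activo del cliente.
--     Si existe un gap de min_gap+ meses consecutivos en cero, descarta todo
--     lo anterior. Esto evita que períodos de inactividad antigua contaminen
--     los componentes estacionales de los modelos.
--     Ejemplo: cliente inactivo 18 meses y luego reactivado → solo usa el
--     período posterior al gap para ajustar los modelos.
--     """
--     n = len(series)
--     last_gap_end = 0
--     i = 0
--     while i < n:
--         if series[i] == 0:
--             j = i + 1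
--             while j < n and series[j] == 0:
--                 j += 1
--             if j - i >= min_gap:
--                 last_gap_end = j
--             i = j
--         else:
--             i += 1
--     return last_gap_end
-- ===== SOURCE B (Python) =====
-- def find_active_start(series, min_gap=12):
--     # Single flat pass: count consecutive zeros; a gap is a nonempty run of
--     # at least min_gap zeros, so the effective threshold is max(min_gap, 1).
--     threshold = max(min_gap, 1)
--     last_gap_end = 0
--     count = 0
--     for i, x in enumerate(series):
--         if x == 0:
--             count += 1
--         else:
--             if count >= threshold:
--                 last_gap_end = i
--             count = 0
--     if count >= threshold:
--         last_gap_end = len(series)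
--     return last_gap_end
-- ===== Notes on version B (the rewrite author's own statement) =====
-- stated objective: simpler
-- what changed: Replaces A's nested while-scan (inner loop finding the end of each zero run, outer index jumping to it) by a single flat enumerate pass maintaining a counter of consecutive zeros, flushed on each nonzero element and once after the loop; a gap being a nonempty run, the threshold is max(min_gap, 1).
import Mathlib
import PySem

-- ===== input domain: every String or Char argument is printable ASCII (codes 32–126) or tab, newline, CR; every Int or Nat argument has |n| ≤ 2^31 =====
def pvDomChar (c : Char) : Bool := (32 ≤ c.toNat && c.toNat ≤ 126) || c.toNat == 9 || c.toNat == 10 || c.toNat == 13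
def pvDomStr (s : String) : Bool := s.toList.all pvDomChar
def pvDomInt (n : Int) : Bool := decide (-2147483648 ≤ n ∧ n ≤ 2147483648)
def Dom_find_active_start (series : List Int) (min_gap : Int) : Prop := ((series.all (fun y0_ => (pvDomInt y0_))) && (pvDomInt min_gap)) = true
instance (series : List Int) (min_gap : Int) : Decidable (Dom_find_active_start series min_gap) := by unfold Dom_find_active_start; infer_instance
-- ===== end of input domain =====

-- B replaces A's nested while-scan with one flat counter pass (objective: simpler).

-- ===== PORT A =====
-- inner while: `while j < n and series[j] == 0: j += 1`
def fasInner (series : List Int) (n j : Int) : Int :=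
  if _h : j < n ∧ PySem.List.pyGet? series j = some 0 then fasInner series n (j + 1) else j
termination_by (n - j).toNat
decreasing_by omega

-- termination fact the outer loop's decreasing_by cites
theorem fasInner_le (series : List Int) (n j : Int) : j ≤ fasInner series n j := by
  rw [fasInner]
  split
  · have := fasInner_le series n (j + 1); omega
  · omega
termination_by (n - j).toNat
decreasing_by omega

-- outer while over index i, carrying last_gap_end
def fasLoop (series : List Int) (n min_gap last i : Int) : Int :=
  if _h : i < n then
    if PySem.List.pyGet? series i = some 0 then
      let j := fasInner series n (i + 1)
      fasLoop series n min_gap (if min_gap ≤ j - i then j else last) j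
    else
      fasLoop series n min_gap last (i + 1)
  else last
termination_by (n - i).toNat
decreasing_by
  · have := fasInner_le series n (i + 1); omega
  · omega

def find_active_start (series : List Int) (min_gap : Int) : Int :=
  fasLoop series (series.length : Int) min_gap 0 0

-- ===== PORT B =====
def find_active_start_alt (series : List Int) (min_gap : Int) : Int :=
  let threshold := max min_gap 1
  let st := (PySem.List.enumerate series).foldl
    (fun (st : Int × Int) (p : Int × Int) =>
      if p.2 = 0 then (st.1, st.2 + 1)
      else if threshold ≤ st.2 then (p.1, 0) else (st.1, 0))
    (0, 0)
  if threshold ≤ st.2 then (series.length : Int) else st.1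

-- ===== PRECONDITION & SPEC =====
def Spec_find_active_start (series : List Int) (min_gap : Int) (out : Int) : Prop := out = find_active_start_alt series min_gap
instance (series : List Int) (min_gap : Int) (out : Int) : Decidable (Spec_find_active_start series min_gap out) := by unfold Spec_find_active_start; infer_instance

-- ===== CLAIM (what is proved, stated in full; the proofs are below) =====
def Claim_equal_find_active_start : Prop := ∀ (series : List Int) (min_gap : Int), Dom_find_active_start series min_gap → Spec_find_active_start series min_gap (find_active_start series min_gap)

-- ===== LEMMAS AND PROOFS =====

-- common recursive description of B's counter pass (proof-only helper)
def runB (t : Int) : List Int → Int → Int → Int → Int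
  | [], pos, _last, count => if t ≤ count then pos else _last
  | x :: xs, pos, last, count =>
      if x = 0 then runB t xs (pos + 1) last (count + 1)
      else runB t xs (pos + 1) (if t ≤ count then pos else last) 0

theorem foldB_eq_runB (t : Int) (l : List Int) (pos last count : Int) :
    (let st := (PySem.List.enumerate l pos).foldl
      (fun (st : Int × Int) (p : Int × Int) =>
        if p.2 = 0 then (st.1, st.2 + 1)
        else if t ≤ st.2 then (p.1, 0) else (st.1, 0))
      (last, count);
     if t ≤ st.2 then pos + (l.length : Int) else st.1) = runB t l pos last count := by
  induction l generalizing pos last count with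
  | nil => simp [runB, PySem.List.enumerate_nil]
  | cons x xs ih =>
    rw [PySem.List.enumerate_cons]
    simp only [List.foldl_cons, runB]
    by_cases hx : x = 0
    · simpa [hx, add_assoc, add_comm, add_left_comm] using ih (pos + 1) last (count + 1)
    · by_cases hc : t ≤ count <;>
        simpa [hx, hc, add_assoc, add_comm, add_left_comm] using
          ih (pos + 1) (if t ≤ count then pos else last) 0

theorem alt_eq_runB (series : List Int) (min_gap : Int) :
    find_active_start_alt series min_gap = runB (max min_gap 1) series 0 0 0 := by
  have h := foldB_eq_runB (max min_gap 1) series 0 0 0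
  simpa [find_active_start_alt] using h

theorem runB_zeros (t : Int) (zs rest : List Int) (hz : ∀ x ∈ zs, x = 0)
    (pos last count : Int) :
    runB t (zs ++ rest) pos last count
      = runB t rest (pos + (zs.length : Int)) last (count + (zs.length : Int)) := by
  induction zs generalizing pos count with
  | nil => simp
  | cons z zs ih =>
    have hz0 : z = 0 := hz z (by simp)
    have hzs : ∀ x ∈ zs, x = 0 := fun x hx => hz x (by simp [hx])
    simp only [List.cons_append, runB, hz0, List.length_cons]
    rw [ih hzs (pos + 1) (count + 1)]
    push_cast
    ring_nf

theorem fasInner_spec (series : List Int) (j : Int) (hj : 0 ≤ j) :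
    fasInner series (series.length : Int) j
      = j + (((series.drop j.toNat).takeWhile (fun x => x == 0)).length : Int) := by
  rw [fasInner]
  split
  · rename_i h
    obtain ⟨h1, h2⟩ := h
    have hjn : j.toNat < series.length := by omega
    have hdrop : series.drop j.toNat = series[j.toNat] :: series.drop (j.toNat + 1) :=
      List.drop_eq_getElem_cons hjn
    have hget : series[j.toNat] = 0 := by
      have := PySem.List.pyGet?_eq_some_getElem (xs := series) (i := j) hj (by omega)
      rw [this] at h2
      exact Option.some_inj.mp h2
    have ih := fasInner_spec series (j + 1) (by omega)
    have h1' : (j + 1).toNat = j.toNat + 1 := by omega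
    rw [h1'] at ih
    rw [ih, hdrop, hget]
    simp
    ring
  · rename_i h
    rw [Classical.not_and_iff_not_or_not] at h
    rcases h with h | h
    · have : series.length ≤ j.toNat := by omega
      simp [List.drop_eq_nil_of_le this]
  -- pyGet? may also fail with j in range but element nonzero
    · by_cases hjn : j.toNat < series.length
      · have hdrop : series.drop j.toNat = series[j.toNat] :: series.drop (j.toNat + 1) :=
          List.drop_eq_getElem_cons hjn
        have hget : series[j.toNat] ≠ 0 := by
          intro h0
          exact h (by rw [PySem.List.pyGet?_eq_some_getElem (xs := series) (i := j) hj (by omega), h0])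
        rw [hdrop]
        simp [hget]
      · simp [List.drop_eq_nil_of_le (by omega : series.length ≤ j.toNat)]
termination_by (series.length - j.toNat)
decreasing_by omega

theorem fasLoop_eq_runB (series : List Int) (min_gap last i : Int)
    (hi : 0 ≤ i) :
    fasLoop series (series.length : Int) min_gap last i
      = runB (max min_gap 1) (series.drop i.toNat) i last 0 := by
  rw [fasLoop]
  split
  · rename_i hlt
    have hin : i.toNat < series.length := by omega
    have hdrop : series.drop i.toNat = series[i.toNat] :: series.drop (i.toNat + 1) :=
      List.drop_eq_getElem_cons hin
    have hpg : PySem.List.pyGet? series i = some series[i.toNat] :=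
      PySem.List.pyGet?_eq_some_getElem (xs := series) (i := i) hi (by omega)
    split
    · rename_i hz
      have hget : series[i.toNat] = 0 := by
        rw [hpg] at hz; exact Option.some_inj.mp hz
      -- the zero run: j = i + 1 + (#zeros after position i)
      set zs := (series.drop (i.toNat + 1)).takeWhile (fun x => x == 0) with hzs
      set rest := (series.drop (i.toNat + 1)).dropWhile (fun x => x == 0) with hrest
      have hj : fasInner series (series.length : Int) (i + 1)
          = (i + 1) + (zs.length : Int) := by
        have hsp := fasInner_spec series (i + 1) (by omega)
        have h1 : (i + 1).toNat = i.toNat + 1 := by omega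
        rw [h1] at hsp
        exact hsp
      set j := fasInner series (series.length : Int) (i + 1) with hjdef
      have hji : j = i + 1 + (zs.length : Int) := hj
      have htd : zs ++ rest = series.drop (i.toNat + 1) :=
        List.takeWhile_append_dropWhile
      have hsplit : series.drop i.toNat = (series[i.toNat] :: zs) ++ rest := by
        rw [hdrop, ← htd]; rfl
      have hallz : ∀ x ∈ series[i.toNat] :: zs, x = 0 := by
        intro x hx
        rcases List.mem_cons.mp hx with h | h
        · rw [h, hget]
        · have := List.mem_takeWhile_imp (hzs ▸ h)
          simpa using this
      have hrest_drop : series.drop j.toNat = rest := by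
        have h2 : j.toNat = i.toNat + 1 + zs.length := by omega
        rw [h2, ← List.drop_drop, ← htd, List.drop_left]
      have hk : ((series[i.toNat] :: zs).length : Int) = j - i := by
        simp only [List.length_cons]; push_cast; omega
      have hrec := fasLoop_eq_runB series min_gap
          (if min_gap ≤ j - i then j else last) j (by omega)
      rw [hrec, hrest_drop, hsplit, runB_zeros _ _ _ hallz, hk]
      have hji1 : i + (j - i) = j := by ring
      rw [hji1, zero_add]
      have hge1 : (1:Int) ≤ j - i := by
        have : (0:Int) ≤ (zs.length : Int) := by positivity
        omega
      have hcond : (max min_gap 1 ≤ j - i) = (min_gap ≤ j - i) := by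
        by_cases hm : min_gap ≤ j - i <;> simp [hm] <;> try omega
      have hnt0 : ¬ max min_gap 1 ≤ (0:Int) := by omega
      rcases hre : rest with _ | ⟨y, ys⟩
      · simp only [runB, hcond, hnt0, if_false]
      · have hy : y ≠ 0 := by
          have := List.head?_dropWhile_not (p := fun x => x == 0) (l := series.drop (i.toNat + 1))
          rw [← hrest, hre] at this
          simpa using this
        simp only [runB, if_neg hy, hcond, hnt0, if_false]
    · rename_i hnz
      have hget : series[i.toNat] ≠ 0 := by
        intro h0; exact hnz (by rw [hpg, h0])
      have hrec := fasLoop_eq_runB series min_gap last (i + 1) (by omega)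
      rw [hrec, hdrop]
      have h1 : (i + 1).toNat = i.toNat + 1 := by omega
      rw [h1]
      simp only [runB, if_neg hget]
      have hnt0 : ¬ max min_gap 1 ≤ (0:Int) := by omega
      simp [hnt0]
  · rename_i hge
    have : series.drop i.toNat = [] := List.drop_eq_nil_of_le (by omega)
    rw [this]
    simp only [runB]
    have : ¬ max min_gap 1 ≤ (0:Int) := by omega
    simp [this]
termination_by (series.length - i.toNat)
decreasing_by
  · have := fasInner_le series (series.length : Int) (i + 1)
    omega
  · omega

-- ===== VERDICT (by name: the statement is the Claim_ definition above) =====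
theorem find_active_start_spec : Claim_equal_find_active_start := by
  intro series min_gap _
  unfold Spec_find_active_start
  rw [find_active_start, alt_eq_runB, fasLoop_eq_runB series min_gap 0 0 le_rfl]
  simp
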